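-- pv_equiv track=rewrite | github.com/santtiojeda8/Progra.ComiB | TP8.py | replicar_lista
-- ===== SOURCE A (Python) =====
-- def replicar_lista(lista, n):
--     # Caso base: Si la lista está vacía o n es 0, no se replica nada.
--     if not lista or n == 0:
--         return []
--
--     # Caso base: Si n es 1, la lista se deja sin cambios.
--     if n == 1:
--         return lista
--
--     # Obtenemos el primer elemento de la lista y replicamos el resto de la lista n-1 veces.
--     primer_elemento = lista[0]
--     resto_de_la_lista_replicada = replicar_lista(lista, n - 1)
--
--     # Concatenamos el primer elemento con el resto replicado.
--     return [primer_elemento] + resto_de_la_lista_replicada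
-- ===== SOURCE B (Python) =====
-- def replicar_lista(lista, n):
--     # Closed form: n-1 copies of the first element prepended to the list.
--     if not lista or n == 0:
--         return []
--     return [lista[0]] * (n - 1) + lista
-- ===== Notes on version B (the rewrite author's own statement) =====
-- stated objective: simpler
-- what changed: Replaces A's recursion on n with a single closed-form expression [lista[0]]*(n-1) + lista; Pre_ excludes non-empty lists with n < 0, where A raises RecursionError.
import Mathlib
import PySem

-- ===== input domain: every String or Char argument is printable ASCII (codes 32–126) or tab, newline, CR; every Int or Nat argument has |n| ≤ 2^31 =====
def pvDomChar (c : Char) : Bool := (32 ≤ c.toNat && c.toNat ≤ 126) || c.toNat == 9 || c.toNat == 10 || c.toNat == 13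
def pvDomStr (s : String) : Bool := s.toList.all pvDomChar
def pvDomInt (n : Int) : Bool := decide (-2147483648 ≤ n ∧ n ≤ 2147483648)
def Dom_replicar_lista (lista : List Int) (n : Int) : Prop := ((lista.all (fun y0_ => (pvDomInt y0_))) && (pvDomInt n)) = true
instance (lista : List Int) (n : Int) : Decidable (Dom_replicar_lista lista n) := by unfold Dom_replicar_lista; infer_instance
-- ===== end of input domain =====

-- B replaces A's recursion on n with the closed form [lista[0]]*(n-1) ++ lista (simpler).


-- ===== PORT A =====
-- Literal port of A's recursion on n. The Python recursion does not terminate for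
-- n < 0 on a non-empty list (excluded by Pre_); the 'n < 0' guard only makes the
-- Lean function total and is never reached inside Pre_.
def replicar_lista (lista : List Int) (n : Int) : List Int :=
  if lista = [] ∨ n = 0 then []
  else if n = 1 then lista
  else if n < 0 then []   -- totality guard only; Python diverges here (outside Pre_)
  else lista.headD 0 :: replicar_lista lista (n - 1)
termination_by n.toNat
decreasing_by
  rename_i h0 h1 h2
  omega

-- ===== PORT B =====
def replicar_lista_alt (lista : List Int) (n : Int) : List Int :=
  if lista = [] ∨ n = 0 then []
  else List.replicate (n - 1).toNat (lista.headD 0) ++ lista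

-- ===== PRECONDITION & SPEC =====
-- Pre_ excludes the inputs (non-empty list, n < 0) on which Python A raises RecursionError.
def Pre_replicar_lista (lista : List Int) (n : Int) : Prop := lista = [] ∨ 0 ≤ n
instance (lista : List Int) (n : Int) : Decidable (Pre_replicar_lista lista n) := by unfold Pre_replicar_lista; infer_instance
def pvWitness_replicar_lista : List Int × Int := ([3, 7], 4)


def Spec_replicar_lista (lista : List Int) (n : Int) (out : List Int) : Prop := out = replicar_lista_alt lista n
instance (lista : List Int) (n : Int) (out : List Int) : Decidable (Spec_replicar_lista lista n out) := by unfold Spec_replicar_lista; infer_instance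

-- ===== CLAIM (what is proved, stated in full; the proofs are below) =====
def Claim_equal_replicar_lista : Prop := ∀ (lista : List Int) (n : Int), Dom_replicar_lista lista n → Pre_replicar_lista lista n → Spec_replicar_lista lista n (replicar_lista lista n)

-- ===== LEMMAS AND PROOFS =====

-- A on a non-empty list and n = m+1 produces m copies of the head followed by the list.
theorem replicar_lista_closed (m : Nat) (lista : List Int) (h : lista ≠ []) :
    replicar_lista lista ((m : Int) + 1) = List.replicate m (lista.headD 0) ++ lista := by
  induction m with
  | zero => simp [replicar_lista, h]
  | succ k ih =>
      have hc : ((k + 1 : Nat) : Int) + 1 = (k : Int) + 1 + 1 := by push_cast; ring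
      rw [hc, replicar_lista]
      have h1 : ¬ (lista = [] ∨ ((k : Int) + 1 + 1) = 0) := by
        push_neg; exact ⟨h, by omega⟩
      rw [if_neg h1, if_neg (by omega : ¬ ((k : Int) + 1 + 1) = 1),
        if_neg (by omega : ¬ ((k : Int) + 1 + 1) < 0),
        (by ring : ((k : Int) + 1 + 1) - 1 = (k : Int) + 1), ih,
        List.replicate_succ, List.cons_append]

-- ===== VERDICT (by name: the statement is the Claim_ definition above) =====
theorem replicar_lista_spec : Claim_equal_replicar_lista := by
  intro lista n _ hpre
  unfold Spec_replicar_lista replicar_lista_alt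
  by_cases hb : lista = [] ∨ n = 0
  · rw [replicar_lista]
    simp [hb]
  · push_neg at hb
    obtain ⟨hl, hn0⟩ := hb
    have hn : 1 ≤ n := by
      rcases hpre with h | h
      · exact absurd h hl
      · omega
    have hrep : n = ((n - 1).toNat : Int) + 1 := by omega
    rw [hrep, replicar_lista_closed _ _ hl]
    simp [hl]
    omega
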